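-- pv_equiv track=rewrite | github.com/Vineyardcode/voynich_slop | scripts/phase86R_revalidation.py | merge_by_skeleton
-- ===== SOURCE A (Python) =====
-- SLOT1 = {'ch', 'sh', 'y'}
--
-- SLOT2_RUNS = {'e'}
--
-- SLOT2_SINGLE = {'q', 'a'}
--
-- SLOT3 = {'o'}
--
-- SLOT4_RUNS = {'i'}
--
-- SLOT4_SINGLE = {'d'}
--
-- SLOT5 = {'y', 'p', 'f', 'k', 'l', 'r', 's', 't',
--          'cth', 'ckh', 'cph', 'cfh', 'n', 'm'}
--
-- def merge_by_skeleton(chunk_counts, word_chunks_list):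
--     """Merge chunks that share the same slot skeleton."""
--     skel_map = {}
--     for c in chunk_counts:
--         glyphs = c.split('.')
--         slots = [0, 0, 0, 0, 0]
--         pos = 0
--         gs = list(glyphs)
--         if pos < len(gs) and gs[pos] in SLOT1:
--             slots[0] = 1; pos += 1
--         if pos < len(gs):
--             if gs[pos] in SLOT2_RUNS:
--                 slots[1] = 1
--                 while pos < len(gs) and gs[pos] in SLOT2_RUNS: pos += 1
--             elif gs[pos] in SLOT2_SINGLE:
--                 slots[1] = 1; pos += 1
--         if pos < len(gs) and gs[pos] in SLOT3:
--             slots[2] = 1; pos += 1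
--         if pos < len(gs):
--             if gs[pos] in SLOT4_RUNS:
--                 slots[3] = 1
--                 while pos < len(gs) and gs[pos] in SLOT4_RUNS: pos += 1
--             elif gs[pos] in SLOT4_SINGLE:
--                 slots[3] = 1; pos += 1
--         if pos < len(gs) and gs[pos] in SLOT5:
--             slots[4] = 1; pos += 1
--         skel = ''.join(str(s) for s in slots)
--         skel_map[c] = skel
--     return skel_map
-- ===== SOURCE B (Python) =====
-- SLOT1 = {'ch', 'sh', 'y'}
-- SLOT2_RUNS = {'e'}
-- SLOT2_SINGLE = {'q', 'a'}
-- SLOT3 = {'o'}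
-- SLOT4_RUNS = {'i'}
-- SLOT4_SINGLE = {'d'}
-- SLOT5 = {'y', 'p', 'f', 'k', 'l', 'r', 's', 't',
--          'cth', 'ckh', 'cph', 'cfh', 'n', 'm'}
--
-- STAGES = [(frozenset(), SLOT1),
--           (SLOT2_RUNS, SLOT2_SINGLE),
--           (frozenset(), SLOT3),
--           (SLOT4_RUNS, SLOT4_SINGLE),
--           (frozenset(), SLOT5)]
--
-- def _classify(g, s):
--     """First stage index >= s whose run or single set contains g (run set first)."""
--     for i in range(s, 5):
--         runs, singles = STAGES[i]
--         if g in runs: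
--             return i, True
--         if g in singles:
--             return i, False
--     return None
--
-- def _skeleton(chunk):
--     # One left-to-right pass over the glyphs, driven by a state machine:
--     # s = next stage still available, run = stage index of an active run (or None).
--     bits = [0, 0, 0, 0, 0]
--     s = 0
--     run = None
--     for g in chunk.split('.'):
--         if run is not None and g in STAGES[run][0]:
--             continue
--         if run is not None:
--             s = run + 1
--             run = None
--         hit = _classify(g, s)
--         if hit is None:
--             break
--         i, is_run = hit
--         bits[i] = 1
--         if is_run:
--             run = i
--         else:
--             s = i + 1
--     return ''.join(map(str, bits))
--
-- def merge_by_skeleton(chunk_counts, word_chunks_list):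
--     return {c: _skeleton(c) for c in chunk_counts}
-- ===== Notes on version B (the rewrite author's own statement) =====
-- stated objective: alternative
-- what changed: A scans per stage (five unrolled blocks, each with its own position test and while-run loop over the glyphs); B transposes the control flow into a single left-to-right pass over the glyphs driven by a state machine (next-stage pointer + active-run state) with a per-glyph classifier and an early break when no remaining stage matches.
import Mathlib
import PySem

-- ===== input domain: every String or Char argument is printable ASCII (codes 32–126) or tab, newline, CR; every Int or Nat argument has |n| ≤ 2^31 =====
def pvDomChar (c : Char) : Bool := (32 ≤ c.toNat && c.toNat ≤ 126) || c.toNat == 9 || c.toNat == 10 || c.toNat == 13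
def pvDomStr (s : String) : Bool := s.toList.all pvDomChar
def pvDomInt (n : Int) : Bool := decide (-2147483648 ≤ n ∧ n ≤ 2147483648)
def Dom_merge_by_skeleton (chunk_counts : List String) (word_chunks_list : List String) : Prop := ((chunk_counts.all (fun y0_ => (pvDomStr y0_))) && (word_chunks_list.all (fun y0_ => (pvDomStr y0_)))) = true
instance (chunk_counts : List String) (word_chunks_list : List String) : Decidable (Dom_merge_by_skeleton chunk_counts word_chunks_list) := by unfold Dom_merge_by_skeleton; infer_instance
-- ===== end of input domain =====

-- B replaces A's per-stage scan (five unrolled blocks, each testing and advancing the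
-- position, with inner while-loops) by one left-to-right pass over the glyphs driven by a
-- state machine (next-stage pointer + active-run state); same return value, same cost.

-- Python set constants of the module (shared by both ports).
def SLOT1 : PySem.Set String := PySem.Set.ofList ["ch", "sh", "y"]
def SLOT2_RUNS : PySem.Set String := PySem.Set.ofList ["e"]
def SLOT2_SINGLE : PySem.Set String := PySem.Set.ofList ["q", "a"]
def SLOT3 : PySem.Set String := PySem.Set.ofList ["o"]
def SLOT4_RUNS : PySem.Set String := PySem.Set.ofList ["i"]
def SLOT4_SINGLE : PySem.Set String := PySem.Set.ofList ["d"]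
def SLOT5 : PySem.Set String := PySem.Set.ofList ["y", "p", "f", "k", "l", "r", "s", "t",
  "cth", "ckh", "cph", "cfh", "n", "m"]

-- ===== PORT A =====
-- A's 'while pos < len(gs) and gs[pos] in RUNS: pos += 1'
def advanceRun (runs : PySem.Set String) (gs : List String) (pos : Nat) : Nat :=
  if pos < gs.length ∧ PySem.Set.contains runs (gs.getD pos "") then
    advanceRun runs gs (pos + 1)
  else pos
termination_by gs.length - pos
decreasing_by omega

-- the loop body of A: the skeleton of one chunk, five unrolled slot blocks
def skelA (c : String) : String :=
  let gs := (PySem.Str.split? c ".").getD []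
  let n := gs.length
  let p0 : Nat := 0
  let r1 := if p0 < n ∧ PySem.Set.contains SLOT1 (gs.getD p0 "") then ((1 : Int), p0 + 1) else (0, p0)
  let r2 :=
    if r1.2 < n then
      if PySem.Set.contains SLOT2_RUNS (gs.getD r1.2 "") then ((1 : Int), advanceRun SLOT2_RUNS gs r1.2)
      else if PySem.Set.contains SLOT2_SINGLE (gs.getD r1.2 "") then (1, r1.2 + 1)
      else (0, r1.2)
    else (0, r1.2)
  let r3 := if r2.2 < n ∧ PySem.Set.contains SLOT3 (gs.getD r2.2 "") then ((1 : Int), r2.2 + 1) else (0, r2.2)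
  let r4 :=
    if r3.2 < n then
      if PySem.Set.contains SLOT4_RUNS (gs.getD r3.2 "") then ((1 : Int), advanceRun SLOT4_RUNS gs r3.2)
      else if PySem.Set.contains SLOT4_SINGLE (gs.getD r3.2 "") then (1, r3.2 + 1)
      else (0, r3.2)
    else (0, r3.2)
  let r5 := if r4.2 < n ∧ PySem.Set.contains SLOT5 (gs.getD r4.2 "") then ((1 : Int), r4.2 + 1) else (0, r4.2)
  PySem.Str.join "" ([r1.1, r2.1, r3.1, r4.1, r5.1].map PySem.Int.toStr)

def merge_by_skeleton (chunk_counts : List String) (word_chunks_list : List String) : List (String × String) :=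
  (chunk_counts.foldl (fun d c => PySem.Dict.insert d c (skelA c)) PySem.Dict.empty).items

-- ===== PORT B =====
def STAGES : List (PySem.Set String × PySem.Set String) :=
  [(PySem.Set.empty, SLOT1),
   (SLOT2_RUNS, SLOT2_SINGLE),
   (PySem.Set.empty, SLOT3),
   (SLOT4_RUNS, SLOT4_SINGLE),
   (PySem.Set.empty, SLOT5)]

-- Source B's _classify: first stage index >= s whose run or single set contains g
def classifyFrom (s : Nat) (g : String) : Option (Nat × Bool) :=
  if s < 5 then
    let st := STAGES.getD s (PySem.Set.empty, PySem.Set.empty)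
    if PySem.Set.contains st.1 g then some (s, true)
    else if PySem.Set.contains st.2 g then some (s, false)
    else classifyFrom (s + 1) g
  else none
termination_by 5 - s
decreasing_by omega

-- Source B's for-loop over the glyphs (pos = iteration index; break returns bits)
def bLoop (gs : List String) (pos : Nat) (bits : List Int) (s : Nat) (run : Option Nat) : List Int :=
  if _h : pos < gs.length then
    let g := gs.getD pos ""
    if run.isSome ∧ PySem.Set.contains ((STAGES.getD (run.getD 0) (PySem.Set.empty, PySem.Set.empty)).1) g then
      bLoop gs (pos + 1) bits s run
    else
      let s' := match run with | some r => r + 1 | none => s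
      match classifyFrom s' g with
      | none => bits
      | some (i, isRun) =>
          let bits' := bits.set i 1
          if isRun then bLoop gs (pos + 1) bits' s' (some i)
          else bLoop gs (pos + 1) bits' (i + 1) none
  else bits
termination_by gs.length - pos
decreasing_by all_goals omega

def skelB (c : String) : String :=
  let gs := (PySem.Str.split? c ".").getD []
  PySem.Str.join "" ((bLoop gs 0 [0, 0, 0, 0, 0] 0 none).map PySem.Int.toStr)

def merge_by_skeleton_alt (chunk_counts : List String) (word_chunks_list : List String) : List (String × String) :=
  (chunk_counts.foldl (fun d c => PySem.Dict.insert d c (skelB c)) PySem.Dict.empty).items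

-- ===== PRECONDITION & SPEC =====
def Spec_merge_by_skeleton (chunk_counts : List String) (word_chunks_list : List String) (out : List (String × String)) : Prop := out = merge_by_skeleton_alt chunk_counts word_chunks_list
instance (chunk_counts : List String) (word_chunks_list : List String) (out : List (String × String)) : Decidable (Spec_merge_by_skeleton chunk_counts word_chunks_list out) := by unfold Spec_merge_by_skeleton; infer_instance

-- ===== CLAIM (what is proved, stated in full; the proofs are below) =====
def Claim_equal_merge_by_skeleton : Prop := ∀ (chunk_counts : List String) (word_chunks_list : List String), Dom_merge_by_skeleton chunk_counts word_chunks_list → Spec_merge_by_skeleton chunk_counts word_chunks_list (merge_by_skeleton chunk_counts word_chunks_list)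

-- ===== LEMMAS AND PROOFS =====

-- proof-only view of one A stage: the pair-block shape (bit, new position)
def pblock (R S : PySem.Set String) (gs : List String) (p : Nat) : Int × Nat :=
  if p < gs.length then
    if PySem.Set.contains R (gs.getD p "") then ((1 : Int), advanceRun R gs p)
    else if PySem.Set.contains S (gs.getD p "") then (1, p + 1)
    else (0, p)
  else (0, p)

-- A's stage blocks, chained over a stage list
def aBits (sts : List (PySem.Set String × PySem.Set String)) (gs : List String) (p : Nat) : List Int :=
  match sts with
  | [] => []
  | st :: rest =>
      let r := pblock st.1 st.2 gs p
      r.1 :: aBits rest gs r.2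

theorem pblock_empty (S : PySem.Set String) (gs : List String) (p : Nat) :
    pblock PySem.Set.empty S gs p =
      if p < gs.length ∧ PySem.Set.contains S (gs.getD p "") then ((1 : Int), p + 1)
      else (0, p) := by
  unfold pblock
  split_ifs <;> first | rfl | tauto

theorem skelA_eq_aBits (c : String) :
    skelA c = PySem.Str.join ""
      ((aBits STAGES ((PySem.Str.split? c ".").getD []) 0).map PySem.Int.toStr) := by
  unfold skelA STAGES
  simp only [aBits, pblock_empty, List.map]
  rfl

theorem advanceRun_eq_of_not_lt (R : PySem.Set String) (gs : List String) (p : Nat)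
    (h : ¬ p < gs.length) : advanceRun R gs p = p := by
  unfold advanceRun; simp [h]

theorem advanceRun_eq_of_not_mem (R : PySem.Set String) (gs : List String) (p : Nat)
    (h : ¬ PySem.Set.contains R (gs.getD p "")) : advanceRun R gs p = p := by
  unfold advanceRun
  split_ifs with h' <;> first | rfl | tauto

theorem advanceRun_succ (R : PySem.Set String) (gs : List String) (p : Nat)
    (h1 : p < gs.length) (h2 : PySem.Set.contains R (gs.getD p "")) :
    advanceRun R gs p = advanceRun R gs (p + 1) := by
  conv_lhs => unfold advanceRun
  rw [if_pos ⟨h1, h2⟩]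

-- run mode: B consumes exactly A's while-loop, then is at stage r+1
theorem bLoop_run (gs : List String) (p : Nat) (bits : List Int) (s r : Nat) :
    bLoop gs p bits s (some r) =
      bLoop gs (advanceRun ((STAGES.getD r (PySem.Set.empty, PySem.Set.empty)).1) gs p)
        bits (r + 1) none := by
  have key : ∀ n p (bits : List Int) (s r : Nat), gs.length - p ≤ n →
      bLoop gs p bits s (some r) =
        bLoop gs (advanceRun ((STAGES.getD r (PySem.Set.empty, PySem.Set.empty)).1) gs p)
          bits (r + 1) none := by
    intro n
    induction n with
    | zero =>
        intro p bits s r hle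
        have hp : ¬ p < gs.length := by omega
        rw [advanceRun_eq_of_not_lt _ _ _ hp]
        conv_lhs => unfold bLoop
        conv_rhs => unfold bLoop
        simp [hp]
    | succ n ih =>
        intro p bits s r hle
        by_cases hp : p < gs.length
        · by_cases hg : PySem.Set.contains ((STAGES.getD r (PySem.Set.empty, PySem.Set.empty)).1) (gs.getD p "")
          · rw [advanceRun_succ _ _ _ hp hg]
            conv_lhs => unfold bLoop
            simp only [hp, dif_pos, Option.isSome_some, Option.getD_some, true_and, hg, if_pos]
            exact ih (p + 1) bits s r (by omega)
          · rw [advanceRun_eq_of_not_mem _ _ _ hg]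
            simp [List.getD, List.getElem?_eq_getElem hp] at hg
            conv_lhs => unfold bLoop
            conv_rhs => unfold bLoop
            simp [hp, hg]
        · have hp' : ¬ p < gs.length := hp
          rw [advanceRun_eq_of_not_lt _ _ _ hp']
          conv_lhs => unfold bLoop
          conv_rhs => unfold bLoop
          simp [hp']
  exact key (gs.length - p) p bits s r le_rfl

-- p past the end: all remaining stages give bit 0
theorem aBits_past (sts : List (PySem.Set String × PySem.Set String)) (gs : List String)
    (p : Nat) (h : ¬ p < gs.length) :
    aBits sts gs p = List.replicate sts.length 0 := by
  induction sts with
  | nil => rfl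
  | cons st rest ih =>
      simp [aBits, pblock, h, ih, List.replicate]

theorem take_set_succ (bits : List Int) (i : Nat) (v : Int) (h : i < bits.length) :
    (bits.set i v).take (i + 1) = bits.take i ++ [v] := by
  induction bits generalizing i with
  | nil => simp at h
  | cons b tl ih =>
      cases i with
      | zero => simp
      | succ i =>
          simp only [List.set, List.take, List.cons_append, List.cons.injEq, true_and]
          exact ih i (by simpa using h)

theorem take_succ_getD (l : List Int) (s : Nat) (h : s < l.length) :
    l.take (s + 1) = l.take s ++ [l.getD s 0] := by
  rw [List.take_succ]
  simp [List.getD, List.getElem?_eq_getElem h]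

theorem getD_set_ne (l : List Int) (i j : Nat) (v : Int) (h : i ≠ j) :
    (l.set i v).getD j 0 = l.getD j 0 := by
  simp [List.getD, List.getElem?_set_ne h]

theorem eq_take_append_replicate (bits : List Int) (s : Nat) (h5 : bits.length = 5) (hs : s ≤ 5)
    (hz : ∀ j, s ≤ j → bits.getD j 0 = 0) :
    bits = bits.take s ++ List.replicate (5 - s) 0 := by
  apply List.ext_getElem
  · simp [h5]; omega
  · intro i h1 h2
    by_cases hi : i < s
    · rw [List.getElem_append_left (by simp [h5]; omega)]
      simp
    · rw [List.getElem_append_right (by simp [h5]; omega)]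
      rw [List.getElem_replicate]
      have := hz i (by omega)
      rwa [List.getD, List.getElem?_eq_getElem h1, Option.getD_some] at this

theorem classifyFrom_ge (s : Nat) (g : String) (h : ¬ s < 5) : classifyFrom s g = none := by
  unfold classifyFrom; simp [h]

-- main invariant: from state (s, none) at position p, B computes A's remaining stage bits
theorem bLoop_none (gs : List String) : ∀ k s, s + k = 5 → ∀ p (bits : List Int),
    bits.length = 5 → (∀ j, s ≤ j → bits.getD j 0 = 0) →
    bLoop gs p bits s none = bits.take s ++ aBits (STAGES.drop s) gs p := by
  intro k
  induction k with
  | zero =>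
      intro s hs p bits h5 hz
      have hs5 : s = 5 := by omega
      subst hs5
      have hdrop : STAGES.drop 5 = [] := rfl
      rw [hdrop]
      conv_lhs => unfold bLoop
      by_cases hp : p < gs.length
      · simp [hp, classifyFrom_ge 5 _ (by omega), List.take_of_length_le (le_of_eq h5), aBits]
      · simp [hp, List.take_of_length_le (le_of_eq h5), aBits]
  | succ k ih =>
      intro s hs p bits h5 hz
      have hs5 : s < 5 := by omega
      have hlen : s < STAGES.length := by rw [show STAGES.length = 5 from rfl]; omega
      set st := STAGES.getD s (PySem.Set.empty, PySem.Set.empty) with hst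
      have hsome : STAGES[s]? = some st := by
        rw [hst, List.getD_eq_getElem _ _ hlen]
        exact List.getElem?_eq_getElem hlen
      have hdrop : STAGES.drop s = st :: STAGES.drop (s + 1) := by
        rw [List.drop_eq_getElem_cons hlen, hst, List.getD_eq_getElem _ _ hlen]
      rw [hdrop]
      by_cases hp : p < gs.length
      · set g := gs.getD p "" with hgdef
        have hbl : s < bits.length := by omega
        by_cases hR : PySem.Set.contains st.1 g
        · have hR' : g ∈ st.1 := by simpa [PySem.Set.contains] using hR
          have hclass : classifyFrom s g = some (s, true) := by
            conv_lhs => unfold classifyFrom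
            simp [hs5, List.getD, hsome, hR']
          have hpb : pblock st.1 st.2 gs p = (1, advanceRun st.1 gs p) := by
            unfold pblock
            rw [if_pos hp, ← hgdef, if_pos hR]
          conv_lhs => unfold bLoop
          rw [dif_pos hp]
          simp only [← hgdef]
          simp only [Option.isSome_none, Bool.false_eq_true, false_and, if_neg, hclass,
            not_false_eq_true]
          simp only [if_pos]
          rw [bLoop_run, ← hst, ← advanceRun_succ _ _ _ hp hR,
            ih (s + 1) (by omega) _ (bits.set s 1) (by simp [h5])
              (fun j hj => by rw [getD_set_ne _ _ _ _ (by omega)]; exact hz j (by omega)),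
            take_set_succ _ _ _ hbl]
          simp [aBits, hpb]
        · have hR' : g ∉ st.1 := by simpa [PySem.Set.contains] using hR
          by_cases hS : PySem.Set.contains st.2 g
          · have hS' : g ∈ st.2 := by simpa [PySem.Set.contains] using hS
            have hclass : classifyFrom s g = some (s, false) := by
              conv_lhs => unfold classifyFrom
              simp [hs5, List.getD, hsome, hR', hS']
            have hpb : pblock st.1 st.2 gs p = (1, p + 1) := by
              unfold pblock
              rw [if_pos hp, ← hgdef, if_neg (by simpa [PySem.Set.contains] using hR'),
                if_pos hS]
            conv_lhs => unfold bLoop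
            rw [dif_pos hp]
            simp only [← hgdef]
            simp only [Option.isSome_none, Bool.false_eq_true, false_and, if_neg, hclass,
              not_false_eq_true]
            rw [ih (s + 1) (by omega) _ (bits.set s 1) (by simp [h5])
                (fun j hj => by rw [getD_set_ne _ _ _ _ (by omega)]; exact hz j (by omega)),
              take_set_succ _ _ _ hbl]
            simp [aBits, hpb]
          · have hS' : g ∉ st.2 := by simpa [PySem.Set.contains] using hS
            have hclass : classifyFrom s g = classifyFrom (s + 1) g := by
              conv_lhs => unfold classifyFrom
              simp [hs5, List.getD, hsome, hR', hS']
            have hpb : pblock st.1 st.2 gs p = (0, p) := by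
              unfold pblock
              rw [if_pos hp, ← hgdef, if_neg (by simpa [PySem.Set.contains] using hR'),
                if_neg (by simpa [PySem.Set.contains] using hS')]
            have hswap : bLoop gs p bits s none = bLoop gs p bits (s + 1) none := by
              conv_lhs => unfold bLoop
              conv_rhs => unfold bLoop
              simp only [dif_pos hp]
              simp only [← hgdef]
              simp only [Option.isSome_none, Bool.false_eq_true, false_and, if_neg, hclass,
                not_false_eq_true]
              cases hc : classifyFrom (s + 1) g with
              | none => rfl
              | some ib =>
                  obtain ⟨i, b⟩ := ib
                  cases b
                  · rfl
                  · simp only [if_pos]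
                    rw [bLoop_run, bLoop_run]
            rw [hswap, ih (s + 1) (by omega) p bits h5 (fun j hj => hz j (by omega)),
              take_succ_getD bits s hbl, hz s le_rfl]
            simp [aBits, hpb]
      · conv_lhs => unfold bLoop
        rw [dif_neg hp, aBits_past _ _ _ hp,
          show (st :: STAGES.drop (s + 1)).length = 5 - s by
            simp [show STAGES.length = 5 from rfl]; omega]
        exact eq_take_append_replicate bits s h5 (by omega) hz

theorem skelA_eq_skelB (c : String) : skelA c = skelB c := by
  have hb : skelB c = PySem.Str.join ""
      ((bLoop ((PySem.Str.split? c ".").getD []) 0 [0, 0, 0, 0, 0] 0 none).map PySem.Int.toStr) := rfl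
  rw [skelA_eq_aBits, hb,
    bLoop_none _ 5 0 rfl _ _ rfl (by
      intro j _
      match j with
      | 0 => rfl
      | 1 => rfl
      | 2 => rfl
      | 3 => rfl
      | 4 => rfl
      | (n + 5) => rfl)]
  rfl

-- ===== VERDICT (by name: the statement is the Claim_ definition above) =====
theorem merge_by_skeleton_spec : Claim_equal_merge_by_skeleton := by
  intro chunk_counts word_chunks_list _
  unfold Spec_merge_by_skeleton merge_by_skeleton merge_by_skeleton_alt
  have h : skelA = skelB := funext skelA_eq_skelB
  rw [h]
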